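-- pv_equiv track=rewrite | github.com/ankitkr1606/Battleship | pygame Battleship/Battleship.py | make_ship_position
-- ===== SOURCE A (Python) =====
-- Tiles_row=8
--
-- Tiles_col=8
--
-- def make_ship_position(new_Board , xstartpos , ystartpos, isHorizontal, ship_length, ship):
-- 	ship_coordinates = []
-- 	if isHorizontal:
-- 		for i in range(ship_length):
-- 			if(i+xstartpos > Tiles_row-1) or (new_Board[i+xstartpos][ystartpos] != None) :
-- 				return (False , ship_coordinates)
-- 			else:
-- 				ship_coordinates.append((i+xstartpos,ystartpos))
--
--
-- 	if not isHorizontal: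
-- 		for i in range(ship_length):
-- 			if(i+ystartpos > Tiles_col-1) or (new_Board[xstartpos][i+ystartpos] != None) :
-- 				return (False , ship_coordinates)
-- 			else:
-- 				ship_coordinates.append((xstartpos,i+ystartpos))
-- 	return (True , ship_coordinates)
-- ===== SOURCE B (Python) =====
-- Tiles_row = 8
--
-- Tiles_col = 8
--
-- def make_ship_position(new_Board, xstartpos, ystartpos, isHorizontal, ship_length, ship):
--     dx, dy = (1, 0) if isHorizontal else (0, 1)
--
--     def place(r, c, k):
--         if k <= 0:
--             return (True, [])
--         axis, size = (r, Tiles_row) if isHorizontal else (c, Tiles_col)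
--         if axis >= size or new_Board[r][c] is not None:
--             return (False, [])
--         ok, rest = place(r + dx, c + dy, k - 1)
--         return (ok, [(r, c)] + rest)
--
--     return place(xstartpos, ystartpos, ship_length)
-- ===== Notes on version B (the rewrite author's own statement) =====
-- stated objective: simpler
-- what changed: A uses two separate direction-specific iterative loops with an append accumulator and early returns; B is one unified recursive descent with a direction delta (dx,dy) that recurses on the remaining length and builds the coordinate list front-to-back by cons on return. Pre_ excludes only inputs where A raises IndexError.
import Mathlib
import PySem

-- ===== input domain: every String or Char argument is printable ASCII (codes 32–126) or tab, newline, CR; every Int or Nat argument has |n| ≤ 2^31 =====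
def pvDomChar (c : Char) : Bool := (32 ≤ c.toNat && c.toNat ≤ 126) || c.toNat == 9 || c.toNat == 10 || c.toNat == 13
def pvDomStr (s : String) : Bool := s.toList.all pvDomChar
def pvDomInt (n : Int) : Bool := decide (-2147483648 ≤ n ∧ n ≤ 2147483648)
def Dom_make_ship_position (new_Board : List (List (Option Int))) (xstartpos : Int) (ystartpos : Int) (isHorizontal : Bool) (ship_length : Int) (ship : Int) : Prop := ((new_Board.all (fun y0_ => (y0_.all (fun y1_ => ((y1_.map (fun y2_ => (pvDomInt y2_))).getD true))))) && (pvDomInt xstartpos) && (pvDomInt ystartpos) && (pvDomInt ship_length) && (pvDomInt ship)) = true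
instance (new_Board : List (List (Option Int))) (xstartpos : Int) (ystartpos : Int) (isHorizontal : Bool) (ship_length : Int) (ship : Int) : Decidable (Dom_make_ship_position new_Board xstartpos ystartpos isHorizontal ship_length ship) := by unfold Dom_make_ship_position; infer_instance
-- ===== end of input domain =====

-- B replaces A's two direction-specific accumulator loops by one recursive descent with a
-- direction delta, building the list front-to-back (objective: simpler; same cost).

def Tiles_row : Int := 8
def Tiles_col : Int := 8

-- new_Board[r][c] : some v = the cell's contents, none = Python IndexError (excluded by Pre_)
def pvCell (b : List (List (Option Int))) (r c : Int) : Option (Option Int) :=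
  match PySem.List.pyGet? b r with
  | none => none
  | some row => PySem.List.pyGet? row c

-- ===== PORT A =====
-- loop "for i in range(ship_length)" of A: counter i runs up to stop (Python's range is lazy),
-- early return (False, acc) on failure
def pvLoopA_H (b : List (List (Option Int))) (x y : Int) (i stop : Int) (acc : List (Int × Int)) : Bool × List (Int × Int) :=
  if _h : i < stop then
    (if i + x > Tiles_row - 1 then (false, acc)
     else
       match pvCell b (i + x) y with
       | none => (false, acc)  -- Python raises IndexError here; outside Pre_
       | some v => if v ≠ none then (false, acc)
                   else pvLoopA_H b x y (i + 1) stop (acc ++ [(i + x, y)]))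
  else (true, acc)
termination_by (stop - i).toNat
decreasing_by omega

-- vertical loop of A
def pvLoopA_V (b : List (List (Option Int))) (x y : Int) (i stop : Int) (acc : List (Int × Int)) : Bool × List (Int × Int) :=
  if _h : i < stop then
    (if i + y > Tiles_col - 1 then (false, acc)
     else
       match pvCell b x (i + y) with
       | none => (false, acc)  -- Python raises IndexError here; outside Pre_
       | some v => if v ≠ none then (false, acc)
                   else pvLoopA_V b x y (i + 1) stop (acc ++ [(x, i + y)]))
  else (true, acc)
termination_by (stop - i).toNat
decreasing_by omega

def make_ship_position (new_Board : List (List (Option Int))) (xstartpos : Int) (ystartpos : Int) (isHorizontal : Bool) (ship_length : Int) (ship : Int) : Bool × (List (Int × Int)) :=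
  if isHorizontal then
    pvLoopA_H new_Board xstartpos ystartpos 0 ship_length []
  else
    pvLoopA_V new_Board xstartpos ystartpos 0 ship_length []

-- ===== PORT B =====
-- B's inner recursive function `place(r, c, k)`
def pvPlace (b : List (List (Option Int))) (h : Bool) (dx dy : Int) (r c k : Int) : Bool × List (Int × Int) :=
  if _hk : 0 < k then
    (if (if h then r else c) ≥ (if h then Tiles_row else Tiles_col) then (false, [])
     else
       match pvCell b r c with
       | none => (false, [])  -- Python raises IndexError here; outside Pre_
       | some v =>
         if v.isSome then (false, [])
         else
           let p := pvPlace b h dx dy (r + dx) (c + dy) (k - 1)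
           (p.1, (r, c) :: p.2))
  else (true, [])
termination_by k.toNat
decreasing_by omega

def make_ship_position_alt (new_Board : List (List (Option Int))) (xstartpos : Int) (ystartpos : Int) (isHorizontal : Bool) (ship_length : Int) (ship : Int) : Bool × (List (Int × Int)) :=
  let d : Int × Int := if isHorizontal then (1, 0) else (0, 1)
  pvPlace new_Board isHorizontal d.1 d.2 xstartpos ystartpos ship_length

-- ===== PRECONDITION & SPEC =====
-- Pre_ excludes exactly the inputs where Python A raises IndexError: the first cell access whose
-- step passed the upper-bound test but whose (possibly negative, wrapped) indices leave the board.
-- (The quantifier is capped at 2*board-size+1: the steps before a raise read distinct in-range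
-- indices from a window of that size, so a raise can only occur at a step below the cap.)
def Pre_make_ship_position (new_Board : List (List (Option Int))) (xstartpos : Int) (ystartpos : Int) (isHorizontal : Bool) (ship_length : Int) (ship : Int) : Prop :=
  if isHorizontal then
    ∀ i ∈ PySem.List.pyRange 0 (min ship_length (2 * (new_Board.length : Int) + 1)) 1,
      (∀ j ∈ PySem.List.pyRange 0 i 1, j + xstartpos ≤ 7 ∧ pvCell new_Board (j + xstartpos) ystartpos = some none) →
      i + xstartpos ≤ 7 → (pvCell new_Board (i + xstartpos) ystartpos).isSome = true
  else
    ∀ i ∈ PySem.List.pyRange 0 (min ship_length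
        (2 * (match PySem.List.pyGet? new_Board xstartpos with
              | some row => (row.length : Int)
              | none => 0) + 1)) 1,
      (∀ j ∈ PySem.List.pyRange 0 i 1, j + ystartpos ≤ 7 ∧ pvCell new_Board xstartpos (j + ystartpos) = some none) →
      i + ystartpos ≤ 7 → (pvCell new_Board xstartpos (i + ystartpos)).isSome = true
instance (new_Board : List (List (Option Int))) (xstartpos : Int) (ystartpos : Int) (isHorizontal : Bool) (ship_length : Int) (ship : Int) : Decidable (Pre_make_ship_position new_Board xstartpos ystartpos isHorizontal ship_length ship) := by unfold Pre_make_ship_position; infer_instance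

def pvWitness_make_ship_position : List (List (Option Int)) × Int × Int × Bool × Int × Int :=
  ([[none], [none]], 0, 0, true, 2, 0)

def Spec_make_ship_position (new_Board : List (List (Option Int))) (xstartpos : Int) (ystartpos : Int) (isHorizontal : Bool) (ship_length : Int) (ship : Int) (out : Bool × (List (Int × Int))) : Prop := out = make_ship_position_alt new_Board xstartpos ystartpos isHorizontal ship_length ship
instance (new_Board : List (List (Option Int))) (xstartpos : Int) (ystartpos : Int) (isHorizontal : Bool) (ship_length : Int) (ship : Int) (out : Bool × (List (Int × Int))) : Decidable (Spec_make_ship_position new_Board xstartpos ystartpos isHorizontal ship_length ship out) := by unfold Spec_make_ship_position; infer_instance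

-- ===== CLAIM (what is proved, stated in full; the proofs are below) =====
def Claim_equal_make_ship_position : Prop := ∀ (new_Board : List (List (Option Int))) (xstartpos : Int) (ystartpos : Int) (isHorizontal : Bool) (ship_length : Int) (ship : Int), Dom_make_ship_position new_Board xstartpos ystartpos isHorizontal ship_length ship → Pre_make_ship_position new_Board xstartpos ystartpos isHorizontal ship_length ship → Spec_make_ship_position new_Board xstartpos ystartpos isHorizontal ship_length ship (make_ship_position new_Board xstartpos ystartpos isHorizontal ship_length ship)

-- ===== LEMMAS AND PROOFS =====

lemma pvLoopA_H_eq_place (b : List (List (Option Int))) (x y : Int) :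
    ∀ (n : Nat) (i stop : Int), (stop - i).toNat = n → ∀ acc,
      pvLoopA_H b x y i stop acc
        = ((pvPlace b true 1 0 (i + x) y (stop - i)).1,
           acc ++ (pvPlace b true 1 0 (i + x) y (stop - i)).2) := by
  intro n
  induction n with
  | zero =>
    intro i stop hn acc
    have h : ¬ i < stop := by omega
    have hk : ¬ (0 : Int) < stop - i := by omega
    rw [pvLoopA_H, dif_neg h, pvPlace, dif_neg hk]
    simp
  | succ n ih =>
    intro i stop hn acc
    have h : i < stop := by omega
    have hk : (0 : Int) < stop - i := by omega
    rw [pvLoopA_H, dif_pos h, pvPlace, dif_pos hk]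
    simp only [if_true]
    have hT : Tiles_row = 8 := rfl
    by_cases hb : i + x > Tiles_row - 1
    · rw [if_pos hb, if_pos (by omega : i + x ≥ Tiles_row)]
      simp
    · rw [if_neg hb, if_neg (by omega : ¬ i + x ≥ Tiles_row)]
      cases hc : pvCell b (i + x) y with
      | none => simp
      | some v =>
        cases v with
        | some w => simp
        | none =>
          simp only [ne_eq, not_true_eq_false, ite_false, Option.isSome_none,
            Bool.false_eq_true]
          have ih' := ih (i + 1) stop (by omega) (acc ++ [(i + x, y)])
          rw [ih']
          have e1 : i + 1 + x = i + x + 1 := by ring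
          have e2 : stop - (i + 1) = stop - i - 1 := by ring
          rw [e1, e2]
          simp

lemma pvLoopA_V_eq_place (b : List (List (Option Int))) (x y : Int) :
    ∀ (n : Nat) (i stop : Int), (stop - i).toNat = n → ∀ acc,
      pvLoopA_V b x y i stop acc
        = ((pvPlace b false 0 1 x (i + y) (stop - i)).1,
           acc ++ (pvPlace b false 0 1 x (i + y) (stop - i)).2) := by
  intro n
  induction n with
  | zero =>
    intro i stop hn acc
    have h : ¬ i < stop := by omega
    have hk : ¬ (0 : Int) < stop - i := by omega
    rw [pvLoopA_V, dif_neg h, pvPlace, dif_neg hk]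
    simp
  | succ n ih =>
    intro i stop hn acc
    have h : i < stop := by omega
    have hk : (0 : Int) < stop - i := by omega
    rw [pvLoopA_V, dif_pos h, pvPlace, dif_pos hk]
    simp only [Bool.false_eq_true, ite_false]
    have hT : Tiles_col = 8 := rfl
    by_cases hb : i + y > Tiles_col - 1
    · rw [if_pos hb, if_pos (by omega : i + y ≥ Tiles_col)]
      simp
    · rw [if_neg hb, if_neg (by omega : ¬ i + y ≥ Tiles_col)]
      cases hc : pvCell b x (i + y) with
      | none => simp
      | some v =>
        cases v with
        | some w => simp
        | none =>
          simp only [ne_eq, not_true_eq_false, ite_false, Option.isSome_none,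
            Bool.false_eq_true]
          have ih' := ih (i + 1) stop (by omega) (acc ++ [(x, i + y)])
          rw [ih']
          have e1 : i + 1 + y = i + y + 1 := by ring
          have e2 : stop - (i + 1) = stop - i - 1 := by ring
          rw [e1, e2]
          simp

lemma pv_eq_all (new_Board : List (List (Option Int))) (xstartpos ystartpos : Int) (isHorizontal : Bool) (ship_length ship : Int) :
    make_ship_position new_Board xstartpos ystartpos isHorizontal ship_length ship
      = make_ship_position_alt new_Board xstartpos ystartpos isHorizontal ship_length ship := by
  cases isHorizontal with
  | true =>
    show pvLoopA_H new_Board xstartpos ystartpos 0 ship_length []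
        = pvPlace new_Board true 1 0 xstartpos ystartpos ship_length
    have h := pvLoopA_H_eq_place new_Board xstartpos ystartpos _ 0 ship_length rfl []
    simpa using h
  | false =>
    show pvLoopA_V new_Board xstartpos ystartpos 0 ship_length []
        = pvPlace new_Board false 0 1 xstartpos ystartpos ship_length
    have h := pvLoopA_V_eq_place new_Board xstartpos ystartpos _ 0 ship_length rfl []
    simpa using h

-- ===== VERDICT (by name: the statement is the Claim_ definition above) =====
theorem make_ship_position_spec : Claim_equal_make_ship_position := by
  intro new_Board xstartpos ystartpos isHorizontal ship_length ship _ _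
  exact pv_eq_all new_Board xstartpos ystartpos isHorizontal ship_length ship
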